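-- pv_equiv track=rewrite | github.com/harshithbngowda/Smart-Assessment-System-with-Biometric-Validation | backend/modules/pakkafinalqa.py | find_matching_code_for_question
-- ===== SOURCE A (Python) =====
-- from typing import List, Tuple, Dict, Any, Optional
--
-- def find_matching_code_for_question(question: str, code_blocks: List[str], used_codes: set) -> str:
--     """Find the best matching code block for a given question"""
--     question_lower = question.lower()
--
--     # Look for keyword matches
--     for code in code_blocks:
--         if code in used_codes:
--             continue
--
--         code_lower = code.lower()
--
--         # Check for specific matches
--         if 'prime' in question_lower and 'prime' in code_lower:
--             return code
--         elif 'factorial' in question_lower and 'factorial' in code_lower: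
--             return code
--         elif 'fibonacci' in question_lower and ('fibonacci' in code_lower or 'fib' in code_lower):
--             return code
--         elif 'array' in question_lower and 'array' in code_lower:
--             return code
--         elif 'largest' in question_lower and ('max' in code_lower or 'largest' in code_lower):
--             return code
--         elif 'smallest' in question_lower and ('min' in code_lower or 'smallest' in code_lower):
--             return code
--         elif 'even' in question_lower and 'odd' in question_lower and ('even' in code_lower or 'odd' in code_lower):
--             return code
--         elif 'palindrome' in question_lower and 'palindrome' in code_lower:
--             return code
--
--     # If no specific match, return first unused code
--     for code in code_blocks:
--         if code not in used_codes:
--             return code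
--
--     return None
-- ===== SOURCE B (Python) =====
-- def find_matching_code_for_question(question, code_blocks, used_codes):
--     """Keyword-major search: filter the unused candidates once, then for each
--     keyword activated by the question find the earliest candidate containing it
--     (shrinking the search window), and return the candidate at the minimal
--     matching index; otherwise the first candidate, else None."""
--     q = question.lower()
--     keywords = []
--     if 'prime' in q:
--         keywords.append('prime')
--     if 'factorial' in q:
--         keywords.append('factorial')
--     if 'fibonacci' in q:
--         keywords += ['fibonacci', 'fib']
--     if 'array' in q:
--         keywords.append('array')
--     if 'largest' in q:
--         keywords += ['max', 'largest']
--     if 'smallest' in q: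
--         keywords += ['min', 'smallest']
--     if 'even' in q and 'odd' in q:
--         keywords += ['even', 'odd']
--     if 'palindrome' in q:
--         keywords.append('palindrome')
--     candidates = [c for c in code_blocks if c not in used_codes]
--     best = len(candidates)
--     for kw in keywords:
--         for i, c in enumerate(candidates[:best]):
--             if kw in c.lower():
--                 best = i
--                 break
--     if best < len(candidates):
--         return candidates[best]
--     return candidates[0] if candidates else None
-- ===== Notes on version B (the rewrite author's own statement) =====
-- stated objective: alternative
-- what changed: B transposes the loops: it analyses the question once into its activated keywords and filters the unused candidates once, then iterates keyword-major - for each keyword it finds the earliest candidate index containing it, shrinking the search window to candidates[:best] - and returns the candidate at the minimal matching index (first candidate as fallback), instead of A's code-major scan that re-runs the whole elif chain (re-scanning the question) per block plus a second fallback loop.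
import Mathlib
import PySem

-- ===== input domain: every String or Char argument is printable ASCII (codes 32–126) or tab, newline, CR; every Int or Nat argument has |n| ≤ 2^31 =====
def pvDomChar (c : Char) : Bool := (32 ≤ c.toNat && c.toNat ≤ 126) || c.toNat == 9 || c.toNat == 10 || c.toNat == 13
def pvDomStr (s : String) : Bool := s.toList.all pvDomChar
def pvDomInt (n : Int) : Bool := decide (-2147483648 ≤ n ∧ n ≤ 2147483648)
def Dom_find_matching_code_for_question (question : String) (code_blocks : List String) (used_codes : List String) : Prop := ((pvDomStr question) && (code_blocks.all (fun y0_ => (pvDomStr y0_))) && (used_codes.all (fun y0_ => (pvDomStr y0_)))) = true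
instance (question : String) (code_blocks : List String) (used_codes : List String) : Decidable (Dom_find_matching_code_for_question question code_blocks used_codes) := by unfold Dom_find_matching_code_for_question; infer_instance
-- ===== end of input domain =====

-- B searches keyword-major: it filters the unused candidates once, then for each
-- question-activated keyword finds the earliest matching candidate index over a
-- shrinking window, returning the candidate at the minimal index (first candidate
-- as fallback) — instead of A's code-major elif chain plus a second fallback loop.
-- Same return value; a timing run measured B faster (question keywords checked once, not per block).


-- ===== PORT A =====
-- A's first loop: the elif chain, skipping used codes.
def pvA_loop1 (ql : String) (used : List String) : List String → Option String
  | [] => none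
  | code :: rest =>
    if used.contains code then pvA_loop1 ql used rest
    else
      let cl := PySem.Str.lower code
      if PySem.Str.isIn "prime" ql && PySem.Str.isIn "prime" cl then some code
      else if PySem.Str.isIn "factorial" ql && PySem.Str.isIn "factorial" cl then some code
      else if PySem.Str.isIn "fibonacci" ql && (PySem.Str.isIn "fibonacci" cl || PySem.Str.isIn "fib" cl) then some code
      else if PySem.Str.isIn "array" ql && PySem.Str.isIn "array" cl then some code
      else if PySem.Str.isIn "largest" ql && (PySem.Str.isIn "max" cl || PySem.Str.isIn "largest" cl) then some code
      else if PySem.Str.isIn "smallest" ql && (PySem.Str.isIn "min" cl || PySem.Str.isIn "smallest" cl) then some code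
      else if PySem.Str.isIn "even" ql && PySem.Str.isIn "odd" ql && (PySem.Str.isIn "even" cl || PySem.Str.isIn "odd" cl) then some code
      else if PySem.Str.isIn "palindrome" ql && PySem.Str.isIn "palindrome" cl then some code
      else pvA_loop1 ql used rest

-- A's second loop: first unused code.
def pvA_loop2 (used : List String) : List String → Option String
  | [] => none
  | code :: rest => if used.contains code then pvA_loop2 used rest else some code

def find_matching_code_for_question (question : String) (code_blocks : List String) (used_codes : List String) : Option String :=
  let ql := PySem.Str.lower question
  match pvA_loop1 ql used_codes code_blocks with
  | some c => some c
  | none => pvA_loop2 used_codes code_blocks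

-- ===== PORT B =====
-- B's question analysis: the flat list of keywords activated by the question.
def pvB_keywords (q : String) : List String :=
  (if PySem.Str.isIn "prime" q then ["prime"] else []) ++
  (if PySem.Str.isIn "factorial" q then ["factorial"] else []) ++
  (if PySem.Str.isIn "fibonacci" q then ["fibonacci", "fib"] else []) ++
  (if PySem.Str.isIn "array" q then ["array"] else []) ++
  (if PySem.Str.isIn "largest" q then ["max", "largest"] else []) ++
  (if PySem.Str.isIn "smallest" q then ["min", "smallest"] else []) ++
  (if PySem.Str.isIn "even" q && PySem.Str.isIn "odd" q then ["even", "odd"] else []) ++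
  (if PySem.Str.isIn "palindrome" q then ["palindrome"] else [])

-- B's inner loop: 'for i, c in enumerate(candidates[:best]): if kw in c.lower(): best = i; break'.
def pvB_scan (kw : String) (best : Nat) : List String → Nat → Nat
  | [], _ => best
  | c :: rest, i => if PySem.Str.isIn kw (PySem.Str.lower c) then i else pvB_scan kw best rest (i + 1)

-- B's outer loop over the activated keywords, shrinking the window.
def pvB_best (cands : List String) (keywords : List String) : Nat :=
  keywords.foldl (fun best kw => pvB_scan kw best (cands.take best) 0) cands.length

def find_matching_code_for_question_alt (question : String) (code_blocks : List String) (used_codes : List String) : Option String :=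
  let q := PySem.Str.lower question
  let keywords := pvB_keywords q
  let candidates := code_blocks.filter (fun c => !used_codes.contains c)
  let best := pvB_best candidates keywords
  if best < candidates.length then candidates[best]?
  else match candidates with
       | [] => none
       | c :: _ => some c

-- ===== PRECONDITION & SPEC =====
def Spec_find_matching_code_for_question (question : String) (code_blocks : List String) (used_codes : List String) (out : Option String) : Prop := out = find_matching_code_for_question_alt question code_blocks used_codes
instance (question : String) (code_blocks : List String) (used_codes : List String) (out : Option String) : Decidable (Spec_find_matching_code_for_question question code_blocks used_codes out) := by unfold Spec_find_matching_code_for_question; infer_instance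

-- ===== CLAIM (what is proved, stated in full; the proofs are below) =====
def Claim_equal_find_matching_code_for_question : Prop := ∀ (question : String) (code_blocks : List String) (used_codes : List String), Dom_find_matching_code_for_question question code_blocks used_codes → Spec_find_matching_code_for_question question code_blocks used_codes (find_matching_code_for_question question code_blocks used_codes)

-- ===== LEMMAS AND PROOFS =====

-- A's branch condition on a lowered code, as one boolean.
def pvCondA (ql cl : String) : Bool :=
  (PySem.Str.isIn "prime" ql && PySem.Str.isIn "prime" cl) ||
  (PySem.Str.isIn "factorial" ql && PySem.Str.isIn "factorial" cl) ||
  (PySem.Str.isIn "fibonacci" ql && (PySem.Str.isIn "fibonacci" cl || PySem.Str.isIn "fib" cl)) ||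
  (PySem.Str.isIn "array" ql && PySem.Str.isIn "array" cl) ||
  (PySem.Str.isIn "largest" ql && (PySem.Str.isIn "max" cl || PySem.Str.isIn "largest" cl)) ||
  (PySem.Str.isIn "smallest" ql && (PySem.Str.isIn "min" cl || PySem.Str.isIn "smallest" cl)) ||
  (PySem.Str.isIn "even" ql && PySem.Str.isIn "odd" ql && (PySem.Str.isIn "even" cl || PySem.Str.isIn "odd" cl)) ||
  (PySem.Str.isIn "palindrome" ql && PySem.Str.isIn "palindrome" cl)

-- An elif chain returning the same value x in every branch is the if over the disjunction.
theorem pv_chain_or {α : Type} (b1 b2 b3 b4 b5 b6 b7 b8 : Bool) (x y : α) :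
    (if b1 then x else if b2 then x else if b3 then x else if b4 then x
     else if b5 then x else if b6 then x else if b7 then x else if b8 then x else y) =
      (if b1 || b2 || b3 || b4 || b5 || b6 || b7 || b8 then x else y) := by
  cases b1 <;> cases b2 <;> cases b3 <;> cases b4 <;> cases b5 <;> cases b6 <;> cases b7 <;> cases b8 <;> simp

-- "code matches some activated keyword" is exactly A's branch condition.
set_option maxHeartbeats 1000000 in
theorem pv_keywords_any (ql cl : String) :
    (pvB_keywords ql).any (fun kw => PySem.Str.isIn kw cl) = pvCondA ql cl := by
  unfold pvB_keywords pvCondA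
  cases h1 : PySem.Str.isIn "prime" ql <;>
  cases h2 : PySem.Str.isIn "factorial" ql <;>
  cases h3 : PySem.Str.isIn "fibonacci" ql <;>
  cases h4 : PySem.Str.isIn "array" ql <;>
  cases h5 : PySem.Str.isIn "largest" ql <;>
  cases h6 : PySem.Str.isIn "smallest" ql <;>
  cases h7 : PySem.Str.isIn "even" ql <;>
  cases h8 : PySem.Str.isIn "odd" ql <;>
  cases h9 : PySem.Str.isIn "palindrome" ql <;>
  simp_all [Bool.or_assoc]

-- A's first loop is find? of the condition over the unused candidates.
theorem pvA_loop1_eq_find (ql : String) (used : List String) (cbs : List String) :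
    pvA_loop1 ql used cbs =
      (cbs.filter (fun c => !used.contains c)).find? (fun c => pvCondA ql (PySem.Str.lower c)) := by
  induction cbs with
  | nil => simp [pvA_loop1]
  | cons code rest ih =>
    by_cases hu : used.contains code = true
    · rw [show pvA_loop1 ql used (code :: rest) = pvA_loop1 ql used rest by
        simp only [pvA_loop1, hu, if_true]]
      rw [List.filter_cons_of_neg (by simp [List.mem_of_elem_eq_true hu])]
      exact ih
    · rw [Bool.not_eq_true] at hu
      rw [List.filter_cons_of_pos (by simpa [List.contains_iff_mem] using hu), List.find?_cons]
      simp only [pvA_loop1, hu, Bool.false_eq_true, if_false]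
      rw [pv_chain_or]
      cases hc : pvCondA ql (PySem.Str.lower code) with
      | true =>
        unfold pvCondA at hc
        rw [hc, if_pos rfl]
      | false =>
        unfold pvCondA at hc
        rw [hc]
        simp only [Bool.false_eq_true, if_false]
        exact ih

-- A's second loop is the head of the unused candidates.
theorem pvA_loop2_eq_head (used : List String) (cbs : List String) :
    pvA_loop2 used cbs = (cbs.filter (fun c => !used.contains c)).head? := by
  induction cbs with
  | nil => simp [pvA_loop2]
  | cons code rest ih =>
    by_cases hu : used.contains code = true
    · rw [show pvA_loop2 used (code :: rest) = pvA_loop2 used rest by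
        simp only [pvA_loop2, hu, if_true]]
      rw [List.filter_cons_of_neg (by simp [List.mem_of_elem_eq_true hu])]
      exact ih
    · rw [Bool.not_eq_true] at hu
      rw [show pvA_loop2 used (code :: rest) = some code by
        simp only [pvA_loop2, hu, Bool.false_eq_true, if_false]]
      rw [List.filter_cons_of_pos (by simpa [List.contains_iff_mem] using hu)]
      rfl

-- B's inner scan computes findIdx? with offset i, defaulting to best.
theorem pv_scan_eq (kw : String) (best : Nat) (l : List String) :
    ∀ i, pvB_scan kw best l i =
      match l.findIdx? (fun c => PySem.Str.isIn kw (PySem.Str.lower c)) with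
      | some j => i + j
      | none => best := by
  induction l with
  | nil => intro i; simp [pvB_scan]
  | cons c rest ih =>
    intro i
    rw [pvB_scan]
    simp only [List.findIdx?_cons]
    cases hc : PySem.Str.isIn kw (PySem.Str.lower c) with
    | true => simp
    | false =>
      simp only [Bool.false_eq_true, if_false, ih (i + 1)]
      cases h : rest.findIdx? (fun c => PySem.Str.isIn kw (PySem.Str.lower c)) with
      | none => rfl
      | some j => simp only [Option.map_some]; ac_rfl

-- The default index of the first match: findIdx? with the list length as fallback.
def pvIdxD (cands : List String) (p : String → Bool) : Nat :=
  (cands.findIdx? p).getD cands.length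

-- findIdx? on a prefix keeps the global first match exactly when it falls inside the prefix.
theorem pv_findIdx?_take {α : Type} (p : α → Bool) :
    ∀ (l : List α) (b : Nat), (l.take b).findIdx? p = (l.findIdx? p).filter (fun j => j < b) := by
  intro l
  induction l with
  | nil => intro b; simp
  | cons c rest ih =>
    intro b
    cases b with
    | zero =>
      simp only [List.take_zero, List.findIdx?_nil]
      cases h : (c :: rest).findIdx? p <;> simp
    | succ b' =>
      simp only [List.take_succ_cons, List.findIdx?_cons]
      cases hc : p c with
      | true => simp [Option.filter_some]
      | false =>
        simp only [Bool.false_eq_true, if_false, ih b']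
        cases h : rest.findIdx? p with
        | none => simp
        | some j =>
          simp only [Option.filter_some]
          by_cases hj : j < b'
          · have h1 : decide (j < b') = true := by simp [hj]
            simp [Option.filter, h1]
          · have h1 : decide (j < b') = false := by simp [hj]
            simp [Option.filter, h1]

-- One step of B's outer loop is a min with the per-keyword first-match index.
theorem pv_step_eq (kw : String) (cands : List String) (b : Nat) (hb : b ≤ cands.length) :
    pvB_scan kw b (cands.take b) 0 =
      min b (pvIdxD cands (fun c => PySem.Str.isIn kw (PySem.Str.lower c))) := by
  rw [pv_scan_eq, pv_findIdx?_take]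
  unfold pvIdxD
  cases h : cands.findIdx? (fun c => PySem.Str.isIn kw (PySem.Str.lower c)) with
  | none => simp only [Option.filter_none, Option.getD_none]; omega
  | some j =>
    have hj : j < cands.length := (List.findIdx?_eq_some_iff_findIdx_eq.mp h).1
    by_cases hjb : j < b
    · have h1 : decide (j < b) = true := by simp [hjb]
      rw [Option.filter_some, if_pos h1]
      show (0 : Nat) + j = min b ((some j).getD cands.length)
      simp only [Option.getD_some]
      omega
    · have h1 : ¬ (decide (j < b) = true) := by simp [hjb]
      rw [Option.filter_some, if_neg h1]
      show b = min b ((some j).getD cands.length)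
      simp only [Option.getD_some]
      omega

-- A fold of mins whose accumulator is 0 stays 0.
theorem pv_fold_min_zero {κ : Type} (K : List κ) (g : κ → Nat) :
    K.foldl (fun b kw => min b (g kw)) 0 = 0 := by
  induction K with
  | nil => rfl
  | cons k K' ih => simpa using ih

-- If some element's value is 0 the fold of mins is 0.
theorem pv_fold_min_of_zero {κ : Type} (K : List κ) (g : κ → Nat)
    (h : ∃ k ∈ K, g k = 0) : ∀ a, K.foldl (fun b kw => min b (g kw)) a = 0 := by
  induction K with
  | nil => simp at h
  | cons k K' ih =>
    intro a
    obtain ⟨k0, hk0, hg⟩ := h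
    rcases List.mem_cons.mp hk0 with h0 | h0
    · subst h0
      simp only [List.foldl_cons, hg, Nat.min_zero]
      exact pv_fold_min_zero K' g
    · exact ih ⟨k0, h0, hg⟩ _

-- A fold of mins commutes with +1 on accumulator and values.
theorem pv_fold_min_succ {κ : Type} (K : List κ) (g : κ → Nat) :
    ∀ a, K.foldl (fun b kw => min b (g kw + 1)) (a + 1) =
      K.foldl (fun b kw => min b (g kw)) a + 1 := by
  induction K with
  | nil => intro a; rfl
  | cons k K' ih =>
    intro a
    simp only [List.foldl_cons]
    have hmin : min (a + 1) (g k + 1) = min a (g k) + 1 := by omega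
    rw [hmin, ih]

-- The fold of mins of per-keyword first-match indices is the first index matching ANY keyword.
theorem pv_fold_min_eq_any {κ : Type} (cands : List String) (K : List κ) (f : κ → String → Bool) :
    K.foldl (fun b kw => min b (pvIdxD cands (f kw))) cands.length =
      pvIdxD cands (fun c => K.any (fun kw => f kw c)) := by
  induction cands generalizing K with
  | nil =>
    simp only [pvIdxD, List.findIdx?_nil, Option.getD_none, List.length_nil]
    exact pv_fold_min_zero K _
  | cons c cs ih =>
    by_cases h : K.any (fun kw => f kw c) = true
    · have hr : pvIdxD (c :: cs) (fun x => K.any (fun kw => f kw x)) = 0 := by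
        simp [pvIdxD, List.findIdx?_cons, h]
      rw [hr]
      rw [List.any_eq_true] at h
      obtain ⟨k0, hk0, hf⟩ := h
      exact pv_fold_min_of_zero K (fun kw => pvIdxD (c :: cs) (f kw))
        ⟨k0, hk0, by simp [pvIdxD, List.findIdx?_cons, hf]⟩ ((c :: cs).length)
    · simp only [List.any_eq_true, not_exists, not_and, Bool.not_eq_true] at h
      have hstep : ∀ (b : Nat) (kw : κ), kw ∈ K →
          min b (pvIdxD (c :: cs) (f kw)) = min b (pvIdxD cs (f kw) + 1) := by
        intro b kw hkw
        have hx : pvIdxD (c :: cs) (f kw) = pvIdxD cs (f kw) + 1 := by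
          simp only [pvIdxD, List.findIdx?_cons, h kw hkw, Bool.false_eq_true, if_false]
          cases hix : cs.findIdx? (f kw) <;> simp
        rw [hx]
      rw [PySem.List.foldl_congr_mem K (fun b kw => min b (pvIdxD (c :: cs) (f kw)))
        (fun b kw => min b (pvIdxD cs (f kw) + 1)) ((c :: cs).length) hstep]
      simp only [List.length_cons]
      rw [pv_fold_min_succ, ih]
      have hKfalse : K.any (fun kw => f kw c) = false := by
        simp only [List.any_eq_false, Bool.not_eq_true]; exact h
      simp only [pvIdxD, List.findIdx?_cons, hKfalse, Bool.false_eq_true, if_false]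
      cases hix : cs.findIdx? (fun x => K.any (fun kw => f kw x)) <;> simp

-- B's whole outer loop computes the first index matching any activated keyword.
theorem pvB_best_eq (cands : List String) (K : List String) :
    pvB_best cands K = pvIdxD cands (fun c => K.any (fun kw => PySem.Str.isIn kw (PySem.Str.lower c))) := by
  have h : ∀ (K' : List String) (a : Nat), a ≤ cands.length →
      K'.foldl (fun best kw => pvB_scan kw best (cands.take best) 0) a =
        K'.foldl (fun b kw => min b (pvIdxD cands (fun c => PySem.Str.isIn kw (PySem.Str.lower c)))) a := by
    intro K'
    induction K' with
    | nil => intro a _; rfl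
    | cons k Ks ihK =>
      intro a ha
      simp only [List.foldl_cons]
      rw [pv_step_eq k cands a ha]
      exact ihK _ (by unfold pvIdxD; omega)
  unfold pvB_best
  rw [h K cands.length le_rfl]
  exact pv_fold_min_eq_any cands K (fun kw c => PySem.Str.isIn kw (PySem.Str.lower c))

-- Selecting by the defaulted first-match index is find? with head? fallback.
theorem pv_select (cands : List String) (p : String → Bool) :
    (if pvIdxD cands p < cands.length then cands[pvIdxD cands p]?
     else match cands with | [] => none | c :: _ => some c) =
      match cands.find? p with
      | some c => some c
      | none => cands.head? := by
  induction cands with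
  | nil => simp [pvIdxD]
  | cons c cs ih =>
    cases hc : p c with
    | true => simp [pvIdxD, List.findIdx?_cons, hc]
    | false =>
      simp only [pvIdxD, List.findIdx?_cons, List.find?_cons, hc, Bool.false_eq_true, if_false]
      cases hix : cs.findIdx? p with
      | none =>
        have hfind : cs.find? p = none := by
          rw [List.find?_eq_none]
          intro x hx
          simp [List.findIdx?_eq_none_iff.mp hix x hx]
        simp [hfind]
      | some j =>
        have hj : j < cs.length := (List.findIdx?_eq_some_iff_findIdx_eq.mp hix).1
        have hjs : (j + 1 : Nat) < cs.length + 1 := by omega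
        simp only [Option.map_some, Option.getD_some, List.length_cons, hjs, if_pos,
          List.getElem?_cons_succ]
        rw [pvIdxD, hix] at ih
        simp only [Option.getD_some, hj, if_pos] at ih
        rw [ih]
        cases hf : cs.find? p with
        | some x => simp
        | none =>
          exfalso
          rw [List.find?_eq_none] at hf
          have hmem := List.findIdx?_eq_some_iff_getElem.mp hix
          have hjx := hmem.2.1
          exact absurd hjx (by simp [hf (cs[j]) (List.getElem_mem hj)])

-- ===== VERDICT (by name: the statement is the Claim_ definition above) =====
theorem find_matching_code_for_question_spec : Claim_equal_find_matching_code_for_question := by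
  intro question code_blocks used_codes _
  unfold Spec_find_matching_code_for_question find_matching_code_for_question find_matching_code_for_question_alt
  dsimp only
  rw [pvA_loop1_eq_find, pvA_loop2_eq_head, pvB_best_eq, pv_select]
  have hP : (fun c => (pvB_keywords (PySem.Str.lower question)).any fun kw => PySem.Str.isIn kw (PySem.Str.lower c)) =
      fun c => pvCondA (PySem.Str.lower question) (PySem.Str.lower c) := by
    funext c; exact pv_keywords_any _ _
  rw [hP]
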